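-- pv_equiv track=rewrite | github.com/gsl925/ReportHelper | app/postprocess.py | extract_key_sentences
-- ===== SOURCE A (Python) =====
-- def extract_key_sentences(text: str, domain_dict: dict, topn: int = 5):
--     # 以關鍵字抽句（非常簡單的 heuristic）
--     lines = [l.strip() for l in text.split('\n') if l.strip()]
--     scored = []
--     for ln in lines:
--         score = 0
--         for kw in domain_dict.get('keywords', []):
--             if kw in ln:
--                 score += 2
--         for code in domain_dict.get('product_codes', []):
--             if code in ln:
--                 score += 3
--         scored.append((score, ln))
--     scored.sort(reverse=True, key=lambda x: x[0])
--     return [s for sc, s in scored[:topn]]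
-- ===== SOURCE B (Python) =====
-- def extract_key_sentences(text: str, domain_dict: dict, topn: int = 5):
--     # Group lines by score and emit buckets in descending score order
--     # (stable within a bucket) instead of sorting the whole scored list.
--     patterns = [(kw, 2) for kw in domain_dict.get('keywords', [])] \
--              + [(pc, 3) for pc in domain_dict.get('product_codes', [])]
--     scored = [(sum(w for p, w in patterns if p in ln), ln)
--               for ln in map(str.strip, text.split('\n')) if ln]
--     out = [ln for k in sorted({sc for sc, _ in scored}, reverse=True)
--               for sc, ln in scored if sc == k]
--     return out[:topn]
-- ===== Notes on version B (the rewrite author's own statement) =====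
-- stated objective: alternative
-- what changed: B scores each line with one merged weighted-pattern list and then emits score buckets in descending score order (group-by over the distinct scores) instead of A's two separate keyword/code loops followed by a stable reverse sort of the whole scored list.
import Mathlib
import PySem

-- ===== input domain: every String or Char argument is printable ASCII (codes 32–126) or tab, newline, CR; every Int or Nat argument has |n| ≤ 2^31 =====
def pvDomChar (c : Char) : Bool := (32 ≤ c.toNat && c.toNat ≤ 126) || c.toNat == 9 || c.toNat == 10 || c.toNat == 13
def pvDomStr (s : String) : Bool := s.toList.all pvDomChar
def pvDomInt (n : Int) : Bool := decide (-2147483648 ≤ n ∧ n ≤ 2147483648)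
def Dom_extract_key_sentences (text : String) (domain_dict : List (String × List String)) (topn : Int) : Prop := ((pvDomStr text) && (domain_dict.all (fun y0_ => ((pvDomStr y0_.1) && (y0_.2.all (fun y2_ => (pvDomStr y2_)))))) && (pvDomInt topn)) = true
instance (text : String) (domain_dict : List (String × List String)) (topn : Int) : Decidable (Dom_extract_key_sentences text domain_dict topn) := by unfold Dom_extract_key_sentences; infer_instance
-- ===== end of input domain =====

-- B groups the scored lines by score and concatenates the buckets in descending
-- score order (scoring with one merged weighted-pattern list) instead of stable-sorting
-- the whole scored list; return values agree everywhere (alternative decomposition).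

-- ===== PORT A =====
def extract_key_sentences (text : String) (domain_dict : List (String × List String)) (topn : Int) : List String :=
  let dd := PySem.Dict.ofList domain_dict
  let lines := (((PySem.Str.split? text "\n").getD []).filter (fun l => PySem.Str.strip l != "")).map PySem.Str.strip
  let scored := lines.foldl (fun acc ln =>
    let score : Int := 0
    let score := (dd.getD "keywords" []).foldl
      (fun s kw => if PySem.Str.isIn kw ln then s + 2 else s) score
    let score := (dd.getD "product_codes" []).foldl
      (fun s code => if PySem.Str.isIn code ln then s + 3 else s) score
    acc ++ [(score, ln)]) ([] : List (Int × String))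
  let sortedScored := PySem.List.sorted scored (fun x => x.1) true
  (PySem.List.slice sortedScored none (some topn)).map (fun x => x.2)

-- ===== PORT B =====
def extract_key_sentences_alt (text : String) (domain_dict : List (String × List String)) (topn : Int) : List String :=
  let dd := PySem.Dict.ofList domain_dict
  let patterns := (dd.getD "keywords" []).map (fun kw => (kw, (2 : Int)))
               ++ (dd.getD "product_codes" []).map (fun pc => (pc, (3 : Int)))
  let scored := ((((PySem.Str.split? text "\n").getD []).map PySem.Str.strip).filter (fun ln => ln != "")).map
    (fun ln => (((patterns.filter (fun pw => PySem.Str.isIn pw.1 ln)).map (fun pw => pw.2)).sum, ln))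
  let out := (PySem.List.sorted (PySem.Set.ofList (scored.map (fun x => x.1))) (fun k => k) true).flatMap
    (fun k => (scored.filter (fun x => x.1 == k)).map (fun x => x.2))
  PySem.List.slice out none (some topn)

-- ===== PRECONDITION & SPEC =====
def Spec_extract_key_sentences (text : String) (domain_dict : List (String × List String)) (topn : Int) (out : List String) : Prop := out = extract_key_sentences_alt text domain_dict topn
instance (text : String) (domain_dict : List (String × List String)) (topn : Int) (out : List String) : Decidable (Spec_extract_key_sentences text domain_dict topn out) := by unfold Spec_extract_key_sentences; infer_instance

-- ===== CLAIM (what is proved, stated in full; the proofs are below) =====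
def Claim_equal_extract_key_sentences : Prop := ∀ (text : String) (domain_dict : List (String × List String)) (topn : Int), Dom_extract_key_sentences text domain_dict topn → Spec_extract_key_sentences text domain_dict topn (extract_key_sentences text domain_dict topn)

-- ===== LEMMAS AND PROOFS =====

-- grouped form: buckets of ps in the key order given by ds
def pvG (ds : List Int) (ps : List (Int × String)) : List (Int × String) :=
  ds.flatMap (fun k => ps.filter (fun x => x.1 == k))

theorem pvInsertBy_nil (bef : (Int × String) → (Int × String) → Bool) (x : Int × String) :
    PySem.List.insertBy bef x [] = [x] := by simp [PySem.List.insertBy]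

theorem pvInsertBy_cons (bef : (Int × String) → (Int × String) → Bool) (x y : Int × String)
    (ys : List (Int × String)) :
    PySem.List.insertBy bef x (y :: ys) =
      if bef x y then x :: y :: ys else y :: PySem.List.insertBy bef x ys := by
  simp [PySem.List.insertBy]

theorem pvSorted_concat (ps : List (Int × String)) (x : Int × String) :
    PySem.List.sorted (ps ++ [x]) (fun p => p.1) true =
      PySem.List.insertBy (fun a b => decide (b.1 < a.1)) x
        (PySem.List.sorted ps (fun p => p.1) true) := by
  simp [PySem.List.sorted, List.foldl_append]

-- insertBy passes over a block on which the test is false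
theorem pvInsertBy_skip (bef : (Int × String) → (Int × String) → Bool) (x : Int × String)
    (as bs : List (Int × String)) (h : ∀ a ∈ as, bef x a = false) :
    PySem.List.insertBy bef x (as ++ bs) = as ++ PySem.List.insertBy bef x bs := by
  induction as with
  | nil => simp
  | cons a as ih =>
      simp only [List.cons_append, pvInsertBy_cons, h a (by simp)]
      simp only [Bool.false_eq_true, if_false, List.cons.injEq, true_and]
      exact ih (fun a ha => h a (by simp [ha]))

-- insertBy puts x in front of a list on which the test is everywhere true
theorem pvInsertBy_front (bef : (Int × String) → (Int × String) → Bool) (x : Int × String)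
    (l : List (Int × String)) (h : ∀ a ∈ l, bef x a = true) :
    PySem.List.insertBy bef x l = x :: l := by
  cases l with
  | nil => simp [pvInsertBy_nil]
  | cons y ys => simp [pvInsertBy_cons, h y (by simp)]

theorem pvMem_pvG {y : Int × String} {ds : List Int} {ps : List (Int × String)}
    (h : y ∈ pvG ds ps) : y.1 ∈ ds := by
  simp only [pvG, List.mem_flatMap, List.mem_filter, beq_iff_eq] at h
  obtain ⟨k, hk, _, rfl⟩ := h
  exact hk

theorem pvG_cons (d : Int) (ds : List Int) (ps : List (Int × String)) :
    pvG (d :: ds) ps = ps.filter (fun x => x.1 == d) ++ pvG ds ps := by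
  simp [pvG]

theorem pvG_append (l r : List Int) (ps : List (Int × String)) :
    pvG (l ++ r) ps = pvG l ps ++ pvG r ps := by
  simp [pvG]

theorem pvG_concat_of_ne (ds : List Int) (ps : List (Int × String)) (x : Int × String)
    (h : ∀ d ∈ ds, d ≠ x.1) : pvG ds (ps ++ [x]) = pvG ds ps := by
  induction ds with
  | nil => simp [pvG]
  | cons d ds ih =>
      have hd : (x.1 == d) = false := by
        simp only [beq_eq_false_iff_ne]; exact fun e => h d (by simp) e.symm
      rw [pvG_cons, pvG_cons, ih (fun d hd => h d (by simp [hd])), List.filter_append]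
      simp [hd]

-- insertion into the grouped form when the key is already present
theorem pvIns_mem (ds : List Int) (ps : List (Int × String)) (x : Int × String)
    (hpw : ds.Pairwise (· > ·)) (hs : x.1 ∈ ds) :
    PySem.List.insertBy (fun a b => decide (b.1 < a.1)) x (pvG ds ps) = pvG ds (ps ++ [x]) := by
  induction ds with
  | nil => simp at hs
  | cons d ds ih =>
      rw [List.pairwise_cons] at hpw
      rw [pvG_cons, pvG_cons]
      by_cases hds : x.1 = d
      · subst hds
        rw [pvInsertBy_skip _ _ _ _ (by
            intro a ha
            have := (List.mem_filter.mp ha).2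
            simp only [beq_iff_eq] at this
            simp [this])]
        rw [pvInsertBy_front _ _ _ (by
            intro a ha
            have h1 := pvMem_pvG ha
            have h2 := hpw.1 a.1 h1
            simp only [decide_eq_true_eq]
            omega)]
        rw [pvG_concat_of_ne ds ps x (fun d hd e => by have := hpw.1 d hd; omega),
            List.filter_append]
        simp
      · have hs' : x.1 ∈ ds := (List.mem_cons.mp hs).resolve_left hds
        have hdx : d > x.1 := hpw.1 x.1 hs'
        rw [pvInsertBy_skip _ _ _ _ (by
            intro a ha
            have := (List.mem_filter.mp ha).2
            simp only [beq_iff_eq] at this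
            simp only [decide_eq_false_iff_not, not_lt]
            omega)]
        rw [ih hpw.2 hs', List.filter_append]
        have : (x.1 == d) = false := by simp [hds]
        simp [this]

-- insertion into the grouped form when the key is new
theorem pvIns_new (l r : List Int) (ps : List (Int × String)) (x : Int × String)
    (hl : ∀ d ∈ l, x.1 < d) (hr : ∀ d ∈ r, d < x.1) (hnew : x.1 ∉ ps.map (fun p => p.1)) :
    PySem.List.insertBy (fun a b => decide (b.1 < a.1)) x (pvG (l ++ r) ps) =
      pvG (l ++ x.1 :: r) (ps ++ [x]) := by
  have hfilter : ps.filter (fun p => p.1 == x.1) = [] := by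
    rw [List.filter_eq_nil_iff]
    intro p hp
    simp only [beq_iff_eq]
    exact fun e => hnew (List.mem_map.mpr ⟨p, hp, e⟩)
  rw [pvG_append, pvG_append,
      pvInsertBy_skip _ _ _ _ (by
        intro a ha
        have h1 := pvMem_pvG ha
        have := hl a.1 h1
        simp only [decide_eq_false_iff_not, not_lt]
        omega),
      pvInsertBy_front _ _ _ (by
        intro a ha
        have h1 := pvMem_pvG ha
        have := hr a.1 h1
        simp [this]),
      pvG_cons,
      pvG_concat_of_ne l ps x (fun d hd e => by have := hl d hd; omega),
      pvG_concat_of_ne r ps x (fun d hd e => by have := hr d hd; omega),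
      List.filter_append]
  simp [hfilter]

-- stable reverse sort on the first component = grouped form, for any strictly
-- descending key list with the same members as the list of occurring keys
theorem pvSorted_eq_pvG (ps : List (Int × String)) (ds : List Int)
    (hpw : ds.Pairwise (· > ·)) (hmem : ∀ d, d ∈ ds ↔ d ∈ ps.map (fun p => p.1)) :
    PySem.List.sorted ps (fun p => p.1) true = pvG ds ps := by
  induction ps using List.reverseRecOn generalizing ds with
  | nil =>
      have : ds = [] := List.eq_nil_iff_forall_not_mem.mpr
        (fun d hd => by simpa using (hmem d).mp hd)
      subst this
      simp [PySem.List.sorted, pvG]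
  | append_singleton ps x ih =>
      rw [pvSorted_concat]
      by_cases hx : x.1 ∈ ps.map (fun p => p.1)
      · have hmem' : ∀ d, d ∈ ds ↔ d ∈ ps.map (fun p => p.1) := by
          intro d
          rw [hmem d]
          simp only [List.map_append, List.mem_append, List.map_cons, List.map_nil,
            List.mem_singleton]
          constructor
          · rintro (h | rfl)
            · exact h
            · exact hx
          · exact fun h => Or.inl h
        rw [ih ds hpw hmem']
        exact pvIns_mem ds ps x hpw ((hmem x.1).mpr (by simp))
      · have hsd : x.1 ∈ ds := (hmem x.1).mpr (by simp)
        obtain ⟨l, r, rfl⟩ := List.append_of_mem hsd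
        rw [List.pairwise_append] at hpw
        obtain ⟨hpl, hpxr, hcross⟩ := hpw
        rw [List.pairwise_cons] at hpxr
        have hl : ∀ d ∈ l, x.1 < d := fun d hd => hcross d hd x.1 (by simp)
        have hr : ∀ d ∈ r, d < x.1 := fun d hd => hpxr.1 d hd
        have hpw' : (l ++ r).Pairwise (· > ·) := by
          rw [List.pairwise_append]
          exact ⟨hpl, hpxr.2, fun a ha b hb => hcross a ha b (by simp [hb])⟩
        have hmem' : ∀ d, d ∈ l ++ r ↔ d ∈ ps.map (fun p => p.1) := by
          intro d
          constructor
          · intro hd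
            have hne : d ≠ x.1 := by
              rcases List.mem_append.mp hd with h | h
              · have := hl d h; omega
              · have := hr d h; omega
            have := (hmem d).mp (by
              rcases List.mem_append.mp hd with h | h
              · exact List.mem_append.mpr (Or.inl h)
              · exact List.mem_append.mpr (Or.inr (List.mem_cons.mpr (Or.inr h))))
            simp only [List.map_append, List.mem_append, List.map_cons, List.map_nil,
              List.mem_singleton] at this
            rcases this with h | h
            · exact h
            · exact absurd h hne
          · intro hd
            have hne : d ≠ x.1 := fun e => hx (e ▸ hd)
            have : d ∈ l ++ x.1 :: r := (hmem d).mpr (by simp [hd])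
            rcases List.mem_append.mp this with h | h
            · exact List.mem_append.mpr (Or.inl h)
            · rcases List.mem_cons.mp h with h | h
              · exact absurd h hne
              · exact List.mem_append.mpr (Or.inr h)
        rw [ih (l ++ r) hpw' hmem']
        exact pvIns_new l r ps x hl hr hx

-- A's keyword/code loop = sum of the weights of the matching weighted patterns
theorem pvScore (ln : String) (ws : List String) (w : Int) (s0 : Int) :
    ws.foldl (fun s kw => if PySem.Str.isIn kw ln then s + w else s) s0 =
      s0 + (((ws.map (fun p => (p, w))).filter
        (fun pw => PySem.Str.isIn pw.1 ln)).map (fun pw => pw.2)).sum := by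
  induction ws generalizing s0 with
  | nil => simp
  | cons k ws ih =>
      simp only [List.foldl_cons, List.map_cons, List.filter_cons]
      by_cases h : PySem.Str.isIn k ln
      · simp only [h, if_true, ih, List.map_cons, List.sum_cons]
        omega
      · simp only [h, ih]
        simp

-- slicing from the front commutes with map
theorem pvSlice_map {α β : Type} (f : α → β) (xs : List α) (b : Int) :
    PySem.List.slice (xs.map f) none (some b) =
      (PySem.List.slice xs none (some b)).map f := by
  by_cases hb : 0 ≤ b
  · rw [PySem.List.slice_to _ hb, PySem.List.slice_to _ hb, List.map_take]
  · obtain ⟨k, hk, hkpos⟩ : ∃ k : Nat, b = -(k : Int) ∧ 0 < k :=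
      ⟨(-b).toNat, by omega, by omega⟩
    subst hk
    rw [PySem.List.slice_to_neg_natCast _ _ hkpos, PySem.List.slice_to_neg_natCast _ _ hkpos,
      List.length_map, List.map_take]

-- ===== VERDICT (by name: the statement is the Claim_ definition above) =====
set_option maxHeartbeats 1600000 in
theorem extract_key_sentences_spec : Claim_equal_extract_key_sentences := by
  intro text domain_dict topn _hdom
  unfold Spec_extract_key_sentences extract_key_sentences extract_key_sentences_alt
  dsimp only
  rw [PySem.List.foldl_append_singleton_eq_map, List.nil_append, List.filter_map]
  have hfun : (fun ln => ln != "") ∘ PySem.Str.strip = fun l => PySem.Str.strip l != "" := rfl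
  rw [hfun]
  set dd := PySem.Dict.ofList domain_dict with hdd
  set lines := (((PySem.Str.split? text "\n").getD []).filter
      (fun l => PySem.Str.strip l != "")).map PySem.Str.strip with hlines
  have hsc : ∀ ln : String,
      ((dd.getD "product_codes" []).foldl
        (fun s code => if PySem.Str.isIn code ln then s + 3 else s)
        ((dd.getD "keywords" []).foldl
          (fun s kw => if PySem.Str.isIn kw ln then s + 2 else s) 0)) =
      ((((dd.getD "keywords" []).map (fun kw => (kw, (2 : Int)))
          ++ (dd.getD "product_codes" []).map (fun pc => (pc, (3 : Int)))).filter
            (fun pw => PySem.Str.isIn pw.1 ln)).map (fun pw => pw.2)).sum := by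
    intro ln
    rw [pvScore ln _ 2 0, pvScore ln _ 3 _, List.filter_append, List.map_append,
      List.sum_append]
    omega
  have hmapeq : lines.map (fun ln =>
      ((dd.getD "product_codes" []).foldl
        (fun s code => if PySem.Str.isIn code ln then s + 3 else s)
        ((dd.getD "keywords" []).foldl
          (fun s kw => if PySem.Str.isIn kw ln then s + 2 else s) 0), ln)) =
    lines.map (fun ln =>
      (((((dd.getD "keywords" []).map (fun kw => (kw, (2 : Int)))
          ++ (dd.getD "product_codes" []).map (fun pc => (pc, (3 : Int)))).filter
            (fun pw => PySem.Str.isIn pw.1 ln)).map (fun pw => pw.2)).sum, ln)) := by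
    exact List.map_congr_left (fun ln _ => by rw [hsc ln])
  rw [hmapeq]
  set S := lines.map (fun ln =>
      (((((dd.getD "keywords" []).map (fun kw => (kw, (2 : Int)))
          ++ (dd.getD "product_codes" []).map (fun pc => (pc, (3 : Int)))).filter
            (fun pw => PySem.Str.isIn pw.1 ln)).map (fun pw => pw.2)).sum, ln)) with hS
  set ds0 := PySem.List.sorted (PySem.Set.ofList (S.map (fun x => x.1))) (fun k => k) true
    with hds0
  have hnd : ds0.Nodup :=
    (PySem.List.sorted_perm _ _ _).nodup_iff.mpr (PySem.Set.nodup_ofList _)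
  have hge : ds0.Pairwise (fun a b => b ≤ a) := PySem.List.sorted_pairwise_rev _ _
  have hpw : ds0.Pairwise (· > ·) := by
    have := hge.and hnd
    exact this.imp (fun h => lt_of_le_of_ne h.1 (Ne.symm h.2))
  have hmem : ∀ d, d ∈ ds0 ↔ d ∈ S.map (fun p => p.1) := by
    intro d
    rw [hds0, PySem.List.mem_sorted, PySem.Set.mem_ofList]
  rw [pvSorted_eq_pvG S ds0 hpw hmem, ← pvSlice_map]
  congr 1
  simp [pvG, List.map_flatMap]
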